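-- pv_equiv track=rewrite | github.com/clarinsi/trankit-train | eval.py | _fix_multiple_roots
-- ===== SOURCE A (Python) =====
-- def _fix_multiple_roots(conllu_str):
--     """Fix sentences where Trankit predicted multiple root tokens (HEAD=0).
--     Keeps the first root; re-attaches subsequent roots to the first root token
--     with deprel='dep'."""
--     fixed_lines = []
--     first_root_id = None
--     for line in conllu_str.splitlines(keepends=True):
--         if line.strip() == '':
--             first_root_id = None
--             fixed_lines.append(line)
--             continue
--         if line.startswith('#'):
--             fixed_lines.append(line)
--             continue
--         parts = line.rstrip('\n').split('\t')
--         if len(parts) >= 8 and parts[6] == '0':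
--             if first_root_id is None:
--                 first_root_id = parts[0]
--             else:
--                 parts[6] = first_root_id
--                 parts[7] = 'dep'
--                 line = '\t'.join(parts) + '\n'
--         fixed_lines.append(line)
--     return ''.join(fixed_lines)
-- ===== SOURCE B (Python) =====
-- def _fix_block(block):
--     root_id = None
--     for line in block:
--         if not line.startswith('#'):
--             parts = line.rstrip('\n').split('\t')
--             if len(parts) >= 8 and parts[6] == '0':
--                 root_id = parts[0]
--                 break
--     if root_id is None:
--         return block
--     fixed = []
--     seen = False
--     for line in block:
--         if not line.startswith('#'):
--             parts = line.rstrip('\n').split('\t')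
--             if len(parts) >= 8 and parts[6] == '0':
--                 if seen:
--                     parts[6] = root_id
--                     parts[7] = 'dep'
--                     line = '\t'.join(parts) + '\n'
--                 else:
--                     seen = True
--         fixed.append(line)
--     return fixed
--
--
-- def _fix_multiple_roots(conllu_str):
--     out = []
--     block = []
--     for line in conllu_str.splitlines(keepends=True):
--         if line.strip() == '':
--             out.extend(_fix_block(block))
--             out.append(line)
--             block = []
--         else:
--             block.append(line)
--     out.extend(_fix_block(block))
--     return ''.join(out)
-- ===== Notes on version B (the rewrite author's own statement) =====
-- stated objective: alternative
-- what changed: A's single stateful pass carrying first_root_id across lines is replaced by partitioning the lines into sentence blocks at blank lines and fixing each block with two passes: one scan to find the first root id, one scan rewriting subsequent root lines.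
import Mathlib
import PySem

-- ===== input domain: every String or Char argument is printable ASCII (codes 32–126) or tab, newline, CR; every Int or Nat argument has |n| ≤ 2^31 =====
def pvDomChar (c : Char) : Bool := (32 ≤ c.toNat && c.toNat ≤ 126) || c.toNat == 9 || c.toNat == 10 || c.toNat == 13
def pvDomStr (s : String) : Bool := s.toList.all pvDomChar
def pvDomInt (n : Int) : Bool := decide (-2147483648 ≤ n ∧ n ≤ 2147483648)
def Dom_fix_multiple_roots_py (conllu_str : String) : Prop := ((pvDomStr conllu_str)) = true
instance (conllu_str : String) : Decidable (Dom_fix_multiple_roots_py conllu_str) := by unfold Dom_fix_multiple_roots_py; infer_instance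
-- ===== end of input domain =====

-- B re-decomposes A's single stateful line loop into sentence-block partitioning with a
-- two-pass per-block fix (find first root, then rewrite later roots); alternative, same cost.


-- shared line-level primitives used identically by both Pythons --

-- hand port of str.splitlines(keepends=True): exact on the domain (line breaks here are '\n', '\r', '\r\n')
def pvSplitKeep (cur : List Char) : List Char → List (List Char)
  | [] => if cur.isEmpty then [] else [cur]
  | '\r' :: '\n' :: rest => (cur ++ ['\r', '\n']) :: pvSplitKeep [] rest
  | '\r' :: rest => (cur ++ ['\r']) :: pvSplitKeep [] rest
  | '\n' :: rest => (cur ++ ['\n']) :: pvSplitKeep [] rest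
  | c :: rest => pvSplitKeep (cur ++ [c]) rest

-- line.strip() == ''
def pvIsBlank (l : List Char) : Bool := PySem.Chars.strip l == []
-- line.startswith('#')
def pvIsComment (l : List Char) : Bool := PySem.Chars.startswith l ['#']
-- hand port of str.rstrip('\n') (drop trailing '\n' characters): exact
def pvRstripNl (l : List Char) : List Char := (l.reverse.dropWhile (· == '\n')).reverse
-- parts = line.rstrip('\n').split('\t')
def pvParts (l : List Char) : List (List Char) := PySem.Chars.splitOn (pvRstripNl l) ['\t']
-- len(parts) >= 8 and parts[6] == '0'
def pvIsRoot (l : List Char) : Bool := decide (8 ≤ (pvParts l).length) && ((pvParts l).getD 6 [] == ['0'])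
-- parts[6] = fr; parts[7] = 'dep'; '\t'.join(parts) + '\n'
def pvRewrite (fr : List Char) (l : List Char) : List Char :=
  PySem.Chars.join ['\t'] (((pvParts l).set 6 fr).set 7 ['d', 'e', 'p']) ++ ['\n']

-- ===== PORT A =====
-- A's loop: per line, with the running first_root_id as state, emitting each (possibly rewritten) line
def pvAGo (fr : Option (List Char)) : List (List Char) → List (List Char)
  | [] => []
  | l :: rest =>
    if pvIsBlank l then l :: pvAGo none rest
    else if pvIsComment l then l :: pvAGo fr rest
    else if pvIsRoot l then
      match fr with
      | none => l :: pvAGo (some ((pvParts l).getD 0 [])) rest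
      | some r => pvRewrite r l :: pvAGo (some r) rest
    else l :: pvAGo fr rest

def fix_multiple_roots_py (conllu_str : String) : String :=
  String.ofList (PySem.Chars.join [] (pvAGo none (pvSplitKeep [] conllu_str.toList)))

-- ===== PORT B =====
-- first pass of _fix_block: find the id of the first root line (break on first hit)
def pvBFindRoot : List (List Char) → Option (List Char)
  | [] => none
  | l :: rest =>
    if !pvIsComment l && pvIsRoot l then some ((pvParts l).getD 0 []) else pvBFindRoot rest

-- second pass of _fix_block: rewrite every root line after the first
def pvBSecond (rid : List Char) (seen : Bool) : List (List Char) → List (List Char)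
  | [] => []
  | l :: rest =>
    if !pvIsComment l && pvIsRoot l then
      if seen then pvRewrite rid l :: pvBSecond rid seen rest
      else l :: pvBSecond rid true rest
    else l :: pvBSecond rid seen rest

def pvBFixBlock (block : List (List Char)) : List (List Char) :=
  match pvBFindRoot block with
  | none => block
  | some rid => pvBSecond rid false block

-- B's outer loop: partition into blocks at blank lines, fixing each closed block
def pvBGo (block : List (List Char)) : List (List Char) → List (List Char)
  | [] => pvBFixBlock block
  | l :: rest =>
    if pvIsBlank l then pvBFixBlock block ++ l :: pvBGo [] rest
    else pvBGo (block ++ [l]) rest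

def fix_multiple_roots_py_alt (conllu_str : String) : String :=
  String.ofList (PySem.Chars.join [] (pvBGo [] (pvSplitKeep [] conllu_str.toList)))

-- ===== PRECONDITION & SPEC =====
def Spec_fix_multiple_roots_py (conllu_str : String) (out : String) : Prop := out = fix_multiple_roots_py_alt conllu_str
instance (conllu_str : String) (out : String) : Decidable (Spec_fix_multiple_roots_py conllu_str out) := by unfold Spec_fix_multiple_roots_py; infer_instance

-- ===== CLAIM (what is proved, stated in full; the proofs are below) =====
def Claim_equal_fix_multiple_roots_py : Prop := ∀ (conllu_str : String), Dom_fix_multiple_roots_py conllu_str → Spec_fix_multiple_roots_py conllu_str (fix_multiple_roots_py conllu_str)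

-- ===== LEMMAS AND PROOFS =====

-- the state of A's loop after processing a list of lines
def pvAState (fr : Option (List Char)) : List (List Char) → Option (List Char)
  | [] => fr
  | l :: rest =>
    if pvIsBlank l then pvAState none rest
    else if pvIsComment l then pvAState fr rest
    else if pvIsRoot l then
      match fr with
      | none => pvAState (some ((pvParts l).getD 0 [])) rest
      | some r => pvAState (some r) rest
    else pvAState fr rest

theorem pvAGo_append (xs : List (List Char)) : ∀ (ys : List (List Char)) (fr : Option (List Char)),
    pvAGo fr (xs ++ ys) = pvAGo fr xs ++ pvAGo (pvAState fr xs) ys := by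
  induction xs with
  | nil => intro ys fr; simp [pvAGo, pvAState]
  | cons l rest ih =>
    intro ys fr
    simp only [List.cons_append, pvAGo, pvAState]
    split_ifs with h1 h2 h3
    · simp [ih]
    · simp [ih]
    · cases fr <;> simp [ih]
    · simp [ih]

-- phase 2: once A has its first root id, it maps each non-blank line like B's seen-pass
theorem pvPhase2 (ls : List (List Char)) (fr : List Char)
    (hb : ∀ l ∈ ls, pvIsBlank l = false) :
    pvAGo (some fr) ls = pvBSecond fr true ls ∧ pvAState (some fr) ls = some fr := by
  induction ls with
  | nil => simp [pvAGo, pvBSecond, pvAState]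
  | cons l rest ih =>
    have hbl : pvIsBlank l = false := hb l (by simp)
    have ihr := ih (fun x hx => hb x (by simp [hx]))
    simp only [pvAGo, pvBSecond, pvAState, hbl, Bool.false_eq_true, if_false]
    by_cases hc : pvIsComment l = true <;> by_cases hr : pvIsRoot l = true <;>
      simp [hc, hr, ihr.1, ihr.2]

-- a line that is neither blank nor a (non-comment) root passes through B's block fix unchanged
theorem pvBFixBlock_cons_skip (l : List Char) (rest : List (List Char))
    (h : (!pvIsComment l && pvIsRoot l) = false) :
    pvBFixBlock (l :: rest) = l :: pvBFixBlock rest := by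
  simp only [pvBFixBlock, pvBFindRoot, h, Bool.false_eq_true, if_false]
  cases hf : pvBFindRoot rest with
  | none => rfl
  | some rid => simp [pvBSecond, h]

-- the block lemma: A run from a fresh state over a blank-free block produces B's fixed block
theorem pvBlock (block : List (List Char)) (hb : ∀ l ∈ block, pvIsBlank l = false) :
    pvAGo none block = pvBFixBlock block := by
  induction block with
  | nil => simp [pvAGo, pvBFixBlock, pvBFindRoot]
  | cons l rest ih =>
    have hbl : pvIsBlank l = false := hb l (by simp)
    have hbr : ∀ x ∈ rest, pvIsBlank x = false := fun x hx => hb x (by simp [hx])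
    by_cases hc : pvIsComment l = true
    · have hskip : (!pvIsComment l && pvIsRoot l) = false := by simp [hc]
      rw [pvBFixBlock_cons_skip l rest hskip]
      simp [pvAGo, hbl, hc, ih hbr]
    · by_cases hr : pvIsRoot l = true
      · -- l is the first root line
        have : pvAGo none (l :: rest) = l :: pvAGo (some ((pvParts l).getD 0 [])) rest := by
          simp [pvAGo, hbl, hc, hr]
        rw [this, (pvPhase2 rest _ hbr).1]
        simp [pvBFixBlock, pvBFindRoot, hc, hr, pvBSecond]
      · have hskip : (!pvIsComment l && pvIsRoot l) = false := by simp [hr]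
        rw [pvBFixBlock_cons_skip l rest hskip]
        simp [pvAGo, hbl, hc, hr, ih hbr]

-- a blank-free block leaves A's fresh state fresh unless a root was met; either way a following
-- blank line resets it, so after a blank both sides restart from scratch
theorem pvMain (ls : List (List Char)) : ∀ (block : List (List Char)),
    (∀ l ∈ block, pvIsBlank l = false) → pvAGo none (block ++ ls) = pvBGo block ls := by
  induction ls with
  | nil => intro block hb; simpa [pvBGo] using pvBlock block hb
  | cons l rest ih =>
    intro block hb
    by_cases hl : pvIsBlank l = true
    · rw [pvAGo_append]
      have h2 : pvAGo (pvAState none block) (l :: rest) = l :: pvAGo none rest := by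
        cases hs : pvAState none block <;> simp [pvAGo, hl]
      rw [h2, pvBlock block hb]
      have := ih [] (by simp)
      simp only [List.nil_append] at this
      simp [pvBGo, hl, this]
    · have : block ++ l :: rest = (block ++ [l]) ++ rest := by simp
      rw [this, ih (block ++ [l]) (by
        intro x hx
        rcases List.mem_append.mp hx with h | h
        · exact hb x h
        · simp only [List.mem_singleton] at h; subst h; simpa using hl)]
      simp [pvBGo, hl]

-- ===== VERDICT (by name: the statement is the Claim_ definition above) =====
theorem fix_multiple_roots_py_spec : Claim_equal_fix_multiple_roots_py := by
  intro s _
  unfold Spec_fix_multiple_roots_py fix_multiple_roots_py fix_multiple_roots_py_alt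
  have := pvMain (pvSplitKeep [] s.toList) [] (by simp)
  simp only [List.nil_append] at this
  rw [this]
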